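-- pv_equiv track=rewrite | github.com/masmi9/BluJay | scanners/aods/core/executive_dashboard_generator.py | _calculate_security_trend
-- ===== SOURCE A (Python) =====
-- from typing import Dict, List, Any, Optional
--
-- def _calculate_security_trend(vulnerabilities: List[Dict[str, Any]]) -> str:
--     """Calculate security trend (simplified)."""
--
--     # Simplified trend calculation
--     critical_count = len([v for v in vulnerabilities if v.get("severity") == "critical"])
--     high_count = len([v for v in vulnerabilities if v.get("severity") == "high"])
--
--     if critical_count == 0 and high_count <= 2:
--         return "improving"
--     elif critical_count <= 1 and high_count <= 5:
--         return "stable"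
--     else:
--         return "declining"
-- ===== SOURCE B (Python) =====
-- from typing import Dict, List, Any
--
-- def _calculate_security_trend(vulnerabilities: List[Dict[str, Any]]) -> str:
--     """Single pass over the vulnerabilities with an early exit."""
--     critical_count = 0
--     high_count = 0
--     for v in vulnerabilities:
--         sev = v.get("severity")
--         if sev == "critical":
--             critical_count += 1
--         elif sev == "high":
--             high_count += 1
--         if critical_count >= 2 or high_count > 5:
--             # either condition alone already forces the final branch
--             return "declining"
--     if critical_count == 0 and high_count <= 2:
--         return "improving"
--     elif critical_count <= 1 and high_count <= 5:
--         return "stable"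
--     else:
--         return "declining"
-- ===== Notes on version B (the rewrite author's own statement) =====
-- stated objective: alternative
-- what changed: Replaces the two full list-comprehension scans with one loop that maintains both counters and returns 'declining' early as soon as critical_count >= 2 or high_count > 5.
import Mathlib
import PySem

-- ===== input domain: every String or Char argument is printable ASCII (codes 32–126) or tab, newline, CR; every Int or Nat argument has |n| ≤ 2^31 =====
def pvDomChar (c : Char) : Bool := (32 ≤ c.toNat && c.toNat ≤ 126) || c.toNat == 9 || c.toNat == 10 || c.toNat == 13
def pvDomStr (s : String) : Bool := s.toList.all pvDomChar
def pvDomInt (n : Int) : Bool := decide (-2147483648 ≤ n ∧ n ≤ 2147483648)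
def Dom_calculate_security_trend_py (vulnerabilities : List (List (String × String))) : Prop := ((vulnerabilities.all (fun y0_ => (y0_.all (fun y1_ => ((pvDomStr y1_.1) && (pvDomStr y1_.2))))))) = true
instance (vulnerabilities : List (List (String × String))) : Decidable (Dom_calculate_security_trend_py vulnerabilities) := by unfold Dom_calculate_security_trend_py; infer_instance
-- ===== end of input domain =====

-- B replaces A's two full filter scans by one loop over the list that maintains
-- both counters and exits early with "declining" once the outcome is forced.
-- ===== PORT A =====
def calculate_security_trend_py (vulnerabilities : List (List (String × String))) : String :=
  let critical_count := (vulnerabilities.filter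
    (fun v => (PySem.Dict.mk v).get? "severity" == some "critical")).length
  let high_count := (vulnerabilities.filter
    (fun v => (PySem.Dict.mk v).get? "severity" == some "high")).length
  if critical_count = 0 ∧ high_count ≤ 2 then "improving"
  else if critical_count ≤ 1 ∧ high_count ≤ 5 then "stable"
  else "declining"

-- ===== PORT B =====
def pvTrendLoop : List (List (String × String)) → Nat → Nat → String
  | [], critical_count, high_count =>
    if critical_count = 0 ∧ high_count ≤ 2 then "improving"
    else if critical_count ≤ 1 ∧ high_count ≤ 5 then "stable"
    else "declining"
  | v :: rest, critical_count, high_count =>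
    let sev := (PySem.Dict.mk v).get? "severity"
    let critical_count := if sev = some "critical" then critical_count + 1 else critical_count
    let high_count := if sev ≠ some "critical" ∧ sev = some "high" then high_count + 1 else high_count
    if 2 ≤ critical_count ∨ 5 < high_count then "declining"
    else pvTrendLoop rest critical_count high_count

def calculate_security_trend_py_alt (vulnerabilities : List (List (String × String))) : String :=
  pvTrendLoop vulnerabilities 0 0

-- ===== PRECONDITION & SPEC =====
def Spec_calculate_security_trend_py (vulnerabilities : List (List (String × String))) (out : String) : Prop := out = calculate_security_trend_py_alt vulnerabilities
instance (vulnerabilities : List (List (String × String))) (out : String) : Decidable (Spec_calculate_security_trend_py vulnerabilities out) := by unfold Spec_calculate_security_trend_py; infer_instance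

-- ===== CLAIM (what is proved, stated in full; the proofs are below) =====
def Claim_equal_calculate_security_trend_py : Prop := ∀ (vulnerabilities : List (List (String × String))), Dom_calculate_security_trend_py vulnerabilities → Spec_calculate_security_trend_py vulnerabilities (calculate_security_trend_py vulnerabilities)

-- ===== LEMMAS AND PROOFS =====

-- ===== VERDICT (by name: the statement is the Claim_ definition above) =====
def pvClassify (c h : Nat) : String :=
  if c = 0 ∧ h ≤ 2 then "improving"
  else if c ≤ 1 ∧ h ≤ 5 then "stable"
  else "declining"

def pvCC (vs : List (List (String × String))) : Nat :=
  (vs.filter (fun v => (PySem.Dict.mk v).get? "severity" == some "critical")).length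

def pvHC (vs : List (List (String × String))) : Nat :=
  (vs.filter (fun v => (PySem.Dict.mk v).get? "severity" == some "high")).length

theorem pvClassify_declining (c h : Nat) (hch : 2 ≤ c ∨ 5 < h) :
    pvClassify c h = "declining" := by
  unfold pvClassify; split_ifs with h1 h2 <;> [omega; omega; rfl]

theorem pvTrendLoop_eq (vs : List (List (String × String))) :
    ∀ c h, pvTrendLoop vs c h = pvClassify (c + pvCC vs) (h + pvHC vs) := by
  induction vs with
  | nil => intro c h; simp [pvTrendLoop, pvCC, pvHC, pvClassify]
  | cons v rest ih =>
    intro c h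
    have hcc : pvCC (v :: rest) =
        (if (PySem.Dict.mk v).get? "severity" = some "critical" then 1 else 0) + pvCC rest := by
      simp only [pvCC, List.filter_cons]
      split_ifs with hx <;> simp_all <;> omega
    have hhc : pvHC (v :: rest) =
        (if (PySem.Dict.mk v).get? "severity" = some "high" then 1 else 0) + pvHC rest := by
      simp only [pvHC, List.filter_cons]
      split_ifs with hx <;> simp_all <;> omega
    rw [hcc, hhc]
    simp only [pvTrendLoop]
    split_ifs with h1 h2 h3 h4 h5 <;>
      first
        | (exact absurd h1 h2.1)
        | (exact absurd h2 h3.1)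
        | (exact (pvClassify_declining _ _ (by omega)).symm)
        | (rw [ih]; congr 1 <;> omega)
        | simp_all

-- ===== VERDICT =====
theorem calculate_security_trend_py_spec : Claim_equal_calculate_security_trend_py := by
  intro vs _
  unfold Spec_calculate_security_trend_py calculate_security_trend_py_alt
  rw [pvTrendLoop_eq]
  simp only [Nat.zero_add]
  rfl
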